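-- pv_equiv track=rewrite | github.com/gimdongwon/Catch_python_tmi | Woojin/7th/competitive-infection/solution.py | solution
-- ===== SOURCE A (Python) =====
-- from collections import deque
-- from collections import deque
-- from collections import deque
--
-- def solution(N, test_tube, result_info):
--     start = []
--
--     for i in range(N):
--         for j in range(N):
--             if test_tube[i][j] != 0:
--                 start.append((test_tube[i][j], i, j))
--
--     second, X, Y = result_info
--     queue = deque([sorted(start)])
--     dirs = [(1, 0), (-1, 0), (0, 1), (0, -1)]
--
--     while queue:
--         if second == 0:
--             return test_tube[X - 1][Y - 1]
--
--         new_viruses = []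
--         viruses = queue.popleft()
--
--         for virus in viruses:
--             v_type, x, y = virus
--
--             for dx, dy in dirs:
--                 nx, ny = x + dx, y + dy
--
--                 if not (0 <= nx < N and 0 <= ny < N):
--                     continue
--
--                 if test_tube[nx][ny] == 0:
--                     test_tube[nx][ny] = v_type
--                 else:
--                     continue
--
--                 new_viruses.append((v_type, nx, ny))
--
--         if new_viruses:
--             queue.append(sorted(new_viruses))
--             second -= 1
--         else:
--             return test_tube[X - 1][Y - 1]
-- ===== SOURCE B (Python) =====
-- def solution(N, test_tube, result_info):
--     # B mutates test_tube in place exactly as A does (same final grid on valid inputs).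
--     second, X, Y = result_info
--     t = 0
--     while t != second:
--         updates = []
--         for i in range(N):
--             for j in range(N):
--                 if test_tube[i][j] != 0:
--                     continue
--                 vals = [test_tube[x][y]
--                         for x, y in ((i + 1, j), (i - 1, j), (i, j + 1), (i, j - 1))
--                         if 0 <= x < N and 0 <= y < N and test_tube[x][y] != 0]
--                 if vals:
--                     updates.append((i, j, min(vals)))
--         if not updates:
--             break
--         for i, j, v in updates:
--             test_tube[i][j] = v
--         t += 1
--     return test_tube[X - 1][Y - 1]
-- ===== Notes on version B (the rewrite author's own statement) =====
-- stated objective: simpler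
-- what changed: A keeps a deque holding the sorted frontier level and spreads sequentially from each virus (first-in-sorted-order claims a cell); B drops the deque, the frontier and all sorting and instead relaxes the whole grid once per wave: every empty cell takes the minimum value of its nonzero orthogonal neighbours, which is provably the same winner as A's sorted-order claim.
import Mathlib
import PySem

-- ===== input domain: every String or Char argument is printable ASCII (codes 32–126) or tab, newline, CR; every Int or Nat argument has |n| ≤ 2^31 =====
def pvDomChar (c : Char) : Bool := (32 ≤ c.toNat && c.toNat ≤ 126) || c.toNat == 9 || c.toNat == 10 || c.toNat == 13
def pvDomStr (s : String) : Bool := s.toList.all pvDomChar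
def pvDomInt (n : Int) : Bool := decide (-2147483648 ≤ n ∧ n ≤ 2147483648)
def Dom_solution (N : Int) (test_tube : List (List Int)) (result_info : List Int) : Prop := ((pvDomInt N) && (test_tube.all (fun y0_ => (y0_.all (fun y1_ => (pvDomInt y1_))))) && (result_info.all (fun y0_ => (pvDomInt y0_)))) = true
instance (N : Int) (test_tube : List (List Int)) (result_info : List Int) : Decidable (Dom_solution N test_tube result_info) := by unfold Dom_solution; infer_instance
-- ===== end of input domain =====

-- B replaces A's deque-of-levels + per-wave sorting by a plain full-grid relaxation
-- (each wave: every empty cell takes the min of its nonzero orthogonal neighbours);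
-- A mutates test_tube in place and B performs the same mutation — the theorems below are about the return value.

-- ===== PORT A =====
-- grid primitives (total stand-ins for test_tube[x][y] read/write; used only at indices
-- that are in bounds under Pre_solution)
def pvGet (g : List (List Int)) (x y : Int) : Int := (g.getD x.toNat []).getD y.toNat 0
def pvSet (g : List (List Int)) (x y v : Int) : List (List Int) :=
  g.set x.toNat ((g.getD x.toNat []).set y.toNat v)
-- the final 'return test_tube[X - 1][Y - 1]' (Python index semantics; in range under Pre_solution)
def pvFinal (g : List (List Int)) (X Y : Int) : Int :=
  PySem.List.pyGetD (PySem.List.pyGetD g (X - 1) []) (Y - 1) 0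

def dirsA : List (Int × Int) := [(1, 0), (-1, 0), (0, 1), (0, -1)]

-- body of A's 'for virus in viruses: for dx, dy in dirs: …'
def spreadA (N : Int) (st : List (List Int) × List (Int × Int × Int)) (vir : Int × Int × Int) :
    List (List Int) × List (Int × Int × Int) :=
  dirsA.foldl (fun st d =>
    let nx := vir.2.1 + d.1
    let ny := vir.2.2 + d.2
    if 0 ≤ nx ∧ nx < N ∧ 0 ≤ ny ∧ ny < N then
      if pvGet st.1 nx ny = 0 then (pvSet st.1 nx ny vir.1, st.2 ++ [(vir.1, nx, ny)])
      else st
    else st) st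

-- Python's tuple order on (v_type, x, y): lexicographic
def keyA (e : Int × Int × Int) : Int ×ₗ Int ×ₗ Int := toLex (e.1, toLex (e.2.1, e.2.2))

-- A's 'while queue' (the deque always holds exactly the newest level); the fuel
-- N²+1 bounds the number of iterations: every iteration but the last infects a fresh cell
def loopA (N X Y : Int) : Nat → Int → List (Int × Int × Int) → List (List Int) → Int
  | 0, _, _, g => pvFinal g X Y
  | fuel + 1, second, level, g =>
    if second = 0 then pvFinal g X Y
    else
      let st := level.foldl (spreadA N) (g, [])
      if st.2 = [] then pvFinal st.1 X Y
      else loopA N X Y fuel (second - 1) (PySem.List.sorted st.2 keyA) st.1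

def solution (N : Int) (test_tube : List (List Int)) (result_info : List Int) : Int :=
  let start := (PySem.List.pyRange 0 N 1).foldl (fun acc i =>
      (PySem.List.pyRange 0 N 1).foldl (fun acc j =>
        if pvGet test_tube i j ≠ 0 then acc ++ [(pvGet test_tube i j, i, j)] else acc) acc) []
  let second := result_info.getD 0 0
  let X := result_info.getD 1 0
  let Y := result_info.getD 2 0
  loopA N X Y (N.toNat * N.toNat + 1) second (PySem.List.sorted start keyA) test_tube

-- ===== PORT B =====
-- values of the nonzero in-range orthogonal neighbours of (i, j)
def valsB (N : Int) (g : List (List Int)) (i j : Int) : List Int :=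
  [(i + 1, j), (i - 1, j), (i, j + 1), (i, j - 1)].filterMap
    (fun c => if 0 ≤ c.1 ∧ c.1 < N ∧ 0 ≤ c.2 ∧ c.2 < N ∧ pvGet g c.1 c.2 ≠ 0 then
        some (pvGet g c.1 c.2) else none)

-- one wave of B: (i, j, min(vals)) for every empty cell with a nonzero neighbour
def waveB (N : Int) (g : List (List Int)) : List (Int × Int × Int) :=
  (PySem.List.pyRange 0 N 1).foldl (fun acc i =>
    (PySem.List.pyRange 0 N 1).foldl (fun acc j =>
      if pvGet g i j ≠ 0 then acc
      else
        match PySem.List.min? (valsB N g i j) (fun v => v) with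
        | none => acc
        | some m => acc ++ [(i, j, m)]) acc) []

def commitB (g : List (List Int)) (U : List (Int × Int × Int)) : List (List Int) :=
  U.foldl (fun g u => pvSet g u.1 u.2.1 u.2.2) g

-- B's 'while t != second' loop (same fuel bound as A's port)
def loopB (N X Y : Int) : Nat → Int → Int → List (List Int) → Int
  | 0, _, _, g => pvFinal g X Y
  | fuel + 1, t, second, g =>
    if t = second then pvFinal g X Y
    else
      let U := waveB N g
      if U = [] then pvFinal g X Y
      else loopB N X Y fuel (t + 1) second (commitB g U)

def solution_alt (N : Int) (test_tube : List (List Int)) (result_info : List Int) : Int :=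
  loopB N (result_info.getD 1 0) (result_info.getD 2 0)
    (N.toNat * N.toNat + 1) 0 (result_info.getD 0 0) test_tube

-- ===== PRECONDITION & SPEC =====
-- Pre_solution holds exactly where the Python A returns normally: result_info unpacks as a
-- triple, the grid really has N×N cells (A indexes all of them), and the final lookup
-- test_tube[X-1][Y-1] is in range; everywhere else A raises.
def Pre_solution (N : Int) (test_tube : List (List Int)) (result_info : List Int) : Prop :=
  result_info.length = 3 ∧
  (0 < N → N.toNat ≤ test_tube.length ∧ ∀ row ∈ test_tube.take N.toNat, N ≤ (row.length : Int)) ∧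
  PySem.Raise.InRange test_tube.length (result_info.getD 1 0 - 1) ∧
  PySem.Raise.InRange (PySem.List.pyGetD test_tube (result_info.getD 1 0 - 1) []).length
    (result_info.getD 2 0 - 1)
instance (N : Int) (test_tube : List (List Int)) (result_info : List Int) : Decidable (Pre_solution N test_tube result_info) := by unfold Pre_solution; infer_instance

def pvWitness_solution : Int × List (List Int) × List Int := (2, [[1, 0], [0, 0]], [1, 1, 1])

def Spec_solution (N : Int) (test_tube : List (List Int)) (result_info : List Int) (out : Int) : Prop := out = solution_alt N test_tube result_info
instance (N : Int) (test_tube : List (List Int)) (result_info : List Int) (out : Int) : Decidable (Spec_solution N test_tube result_info out) := by unfold Spec_solution; infer_instance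

-- ===== CLAIM (what is proved, stated in full; the proofs are below) =====
def Claim_equal_solution : Prop := ∀ (N : Int) (test_tube : List (List Int)) (result_info : List Int), Dom_solution N test_tube result_info → Pre_solution N test_tube result_info → Spec_solution N test_tube result_info (solution N test_tube result_info)


-- ===== LEMMAS AND PROOFS =====

-- cell (i, j) is inside the N×N region
abbrev regionP (N i j : Int) : Prop := 0 ≤ i ∧ i < N ∧ 0 ≤ j ∧ j < N

-- (x, y) is an orthogonal neighbour of (i, j)
def adjB (x y i j : Int) : Bool :=
  (x = i + 1 && y = j) || (x = i - 1 && y = j) || (x = i && y = j + 1) || (x = i && y = j - 1)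

-- the grid really has N×N cells
def WFg (N : Int) (g : List (List Int)) : Prop :=
  ∀ r : Nat, (r : Int) < N → r < g.length ∧ N ≤ ((g.getD r []).length : Int)

-- same row/column layout
def sameShape (g h : List (List Int)) : Prop :=
  g.length = h.length ∧ ∀ r : Nat, (g.getD r []).length = (h.getD r []).length

-- value of the first entry of the level adjacent to (i, j)
def firstAdj (level : List (Int × Int × Int)) (i j : Int) : Option Int :=
  (level.find? (fun e => adjB e.2.1 e.2.2 i j)).map (·.1)

-- the loop invariant tying A's current level to the current grid
def InvA (N : Int) (level : List (Int × Int × Int)) (g : List (List Int)) : Prop :=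
  (∀ e ∈ level, regionP N e.2.1 e.2.2 ∧ pvGet g e.2.1 e.2.2 = e.1 ∧ e.1 ≠ 0) ∧
  level.Pairwise (fun a b => a.1 ≤ b.1) ∧
  (∀ i j x y, regionP N i j → pvGet g i j = 0 → regionP N x y → adjB x y i j = true →
    pvGet g x y ≠ 0 → (pvGet g x y, x, y) ∈ level)

lemma sameShape_refl (g : List (List Int)) : sameShape g g := ⟨rfl, fun _ => rfl⟩
lemma sameShape_trans {g h k : List (List Int)} (h1 : sameShape g h) (h2 : sameShape h k) : sameShape g k :=
  ⟨h1.1.trans h2.1, fun r => (h1.2 r).trans (h2.2 r)⟩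
lemma pvSet_row (g : List (List Int)) (x y v : Int) (r : Nat) :
    (pvSet g x y v).getD r [] =
      if r = x.toNat ∧ x.toNat < g.length then (g.getD x.toNat []).set y.toNat v
      else g.getD r [] := by
  unfold pvSet
  simp only [List.getD_eq_getElem?_getD, List.getElem?_set]
  split
  · next h =>
    subst h
    split
    · next h2 => simp [h2]
    · next h2 => simp [h2]
  · next h => simp [Ne.symm h]

lemma sameShape_pvSet (g : List (List Int)) (x y v : Int) : sameShape g (pvSet g x y v) := by
  refine ⟨(List.length_set ..).symm, fun r => ?_⟩
  rw [pvSet_row]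
  split
  · next h => rw [h.1]; simp
  · rfl

lemma WF_of_shape {N : Int} {g h : List (List Int)} (hs : sameShape g h) (hW : WFg N g) : WFg N h := by
  intro r hr
  obtain ⟨h1, h2⟩ := hW r hr
  exact ⟨hs.1 ▸ h1, (hs.2 r) ▸ h2⟩

lemma grid_eq_of_cells {g h : List (List Int)} (hs : sameShape g h)
    (hc : ∀ i j : Int, 0 ≤ i → 0 ≤ j → pvGet g i j = pvGet h i j) : g = h := by
  apply List.ext_getElem hs.1
  intro r hr1 hr2
  have hrow : (g.getD r []).length = (h.getD r []).length := hs.2 r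
  rw [List.getD_eq_getElem _ _ hr1] at hrow
  rw [List.getD_eq_getElem _ _ hr2] at hrow
  apply List.ext_getElem hrow
  intro c hc1 hc2
  have := hc (r : Int) (c : Int) (by positivity) (by positivity)
  unfold pvGet at this
  simp only [Int.toNat_natCast] at this
  rwa [List.getD_eq_getElem _ _ hr1, List.getD_eq_getElem _ _ hr2,
    List.getD_eq_getElem _ _ hc1, List.getD_eq_getElem _ _ hc2] at this

lemma pvGet_pvSet_same {N : Int} {g : List (List Int)} {x y : Int} (v : Int)
    (hW : WFg N g) (hx : 0 ≤ x) (hxN : x < N) (_hy : 0 ≤ y) (hyN : y < N) :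
    pvGet (pvSet g x y v) x y = v := by
  obtain ⟨hr, hc⟩ := hW x.toNat (by omega)
  obtain ⟨_, hc2⟩ := hW x.toNat (by omega)
  unfold pvGet
  rw [pvSet_row]
  rw [if_pos ⟨rfl, hr⟩]
  have hyl : y.toNat < (g.getD x.toNat []).length := by omega
  rw [List.getD_eq_getElem _ _ (by simpa using hyl)]
  exact List.getElem_set_self (h := by simpa using hyl)

lemma pvGet_pvSet_ne {g : List (List Int)} {i j x y : Int} (v : Int)
    (hi : 0 ≤ i) (hj : 0 ≤ j) (hx : 0 ≤ x) (_hy : 0 ≤ y) (hne : ¬(i = x ∧ j = y)) :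
    pvGet (pvSet g x y v) i j = pvGet g i j := by
  unfold pvGet
  rw [pvSet_row]
  split
  · next h =>
    have hix : i = x := by omega
    have hjy : j ≠ y := fun hj' => hne ⟨hix, hj'⟩
    rw [h.1]
    rcases Nat.lt_or_ge j.toNat (g.getD x.toNat []).length with hcl | hcl
    · rw [List.getD_eq_getElem _ _ (by simpa using hcl), List.getD_eq_getElem _ _ hcl]
      exact List.getElem_set_ne (h := by omega) (hj := by simpa using hcl)
    · rw [List.getD_eq_default _ _ (by simpa using hcl), List.getD_eq_default _ _ hcl]
  · rfl

-- ---- one virus of A's inner loop ----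

lemma spreadF_shape (N : Int) (vir : Int × Int × Int) :
    ∀ (ds : List (Int × Int)) (st : List (List Int) × List (Int × Int × Int)),
    sameShape st.1 ((ds.foldl (fun st d =>
      let nx := vir.2.1 + d.1
      let ny := vir.2.2 + d.2
      if 0 ≤ nx ∧ nx < N ∧ 0 ≤ ny ∧ ny < N then
        if pvGet st.1 nx ny = 0 then (pvSet st.1 nx ny vir.1, st.2 ++ [(vir.1, nx, ny)])
        else st
      else st) st)).1 := by
  intro ds
  induction ds with
  | nil => exact fun st => sameShape_refl _
  | cons d ds ih =>
    intro st
    rw [List.foldl_cons]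
    refine sameShape_trans ?_ (ih _)
    dsimp only
    split
    · split
      · exact sameShape_pvSet _ _ _ _
      · exact sameShape_refl _
    · exact sameShape_refl _

lemma spreadF_cell (N : Int) (vir : Int × Int × Int) :
    ∀ (ds : List (Int × Int)) (g : List (List Int)) (acc : List (Int × Int × Int)),
    WFg N g → ds.Nodup → ∀ (i j : Int), 0 ≤ i → 0 ≤ j →
    pvGet ((ds.foldl (fun st d =>
      let nx := vir.2.1 + d.1
      let ny := vir.2.2 + d.2
      if 0 ≤ nx ∧ nx < N ∧ 0 ≤ ny ∧ ny < N then
        if pvGet st.1 nx ny = 0 then (pvSet st.1 nx ny vir.1, st.2 ++ [(vir.1, nx, ny)])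
        else st
      else st) (g, acc))).1 i j =
      if (∃ d ∈ ds, i = vir.2.1 + d.1 ∧ j = vir.2.2 + d.2) ∧ regionP N i j ∧ pvGet g i j = 0
      then vir.1 else pvGet g i j := by
  intro ds
  induction ds with
  | nil => intro g acc _ _ i j _ _; simp
  | cons d ds ih =>
    intro g acc hW hnd i j hi hj
    rw [List.foldl_cons]
    dsimp only
    rcases List.nodup_cons.mp hnd with ⟨hd, hnd'⟩
    by_cases hb : 0 ≤ vir.2.1 + d.1 ∧ vir.2.1 + d.1 < N ∧ 0 ≤ vir.2.2 + d.2 ∧ vir.2.2 + d.2 < N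
    · rw [if_pos hb]
      by_cases hc : pvGet g (vir.2.1 + d.1) (vir.2.2 + d.2) = 0
      · rw [if_pos hc]
        rw [ih _ _ (WF_of_shape (sameShape_pvSet ..) hW) hnd' i j hi hj]
        by_cases hij : i = vir.2.1 + d.1 ∧ j = vir.2.2 + d.2
        · obtain ⟨hij1, hij2⟩ := hij
          have hset : pvGet (pvSet g (vir.2.1 + d.1) (vir.2.2 + d.2) vir.1) i j = vir.1 := by
            rw [hij1, hij2]
            exact pvGet_pvSet_same _ hW hb.1 hb.2.1 hb.2.2.1 hb.2.2.2
          have hnot : ¬ ∃ d' ∈ ds, i = vir.2.1 + d'.1 ∧ j = vir.2.2 + d'.2 := by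
            rintro ⟨d', hd', h1, h2⟩
            have hdd : d = d' := Prod.ext (by omega) (by omega)
            exact hd (hdd ▸ hd')
          rw [if_neg (fun hcon => hnot hcon.1), hset,
            if_pos ⟨⟨d, List.mem_cons_self .., hij1, hij2⟩,
              (by rw [hij1, hij2]; exact ⟨hb.1, hb.2.1, hb.2.2.1, hb.2.2.2⟩),
              (by rw [hij1, hij2]; exact hc)⟩]
        · have hset : pvGet (pvSet g (vir.2.1 + d.1) (vir.2.2 + d.2) vir.1) i j = pvGet g i j :=
            pvGet_pvSet_ne _ hi hj hb.1 hb.2.2.1 hij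
          rw [hset]
          congr 1
          simp only [eq_iff_iff, and_congr_left_iff]
          intro _
          constructor
          · rintro ⟨d', hd', h⟩; exact ⟨d', List.mem_cons_of_mem _ hd', h⟩
          · rintro ⟨d', hd', h⟩
            rcases List.mem_cons.mp hd' with rfl | hmem
            · exact absurd h hij
            · exact ⟨d', hmem, h⟩
      · rw [if_neg hc]
        rw [ih _ _ hW hnd' i j hi hj]
        congr 1
        simp only [eq_iff_iff]
        constructor
        · rintro ⟨⟨d', hd', h⟩, hr, h0⟩; exact ⟨⟨d', List.mem_cons_of_mem _ hd', h⟩, hr, h0⟩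
        · rintro ⟨⟨d', hd', h⟩, hr, h0⟩
          rcases List.mem_cons.mp hd' with rfl | hmem
          · exact absurd h0 (h.1 ▸ h.2 ▸ hc)
          · exact ⟨⟨d', hmem, h⟩, hr, h0⟩
    · rw [if_neg hb]
      rw [ih _ _ hW hnd' i j hi hj]
      congr 1
      simp only [eq_iff_iff]
      constructor
      · rintro ⟨⟨d', hd', h⟩, hr, h0⟩; exact ⟨⟨d', List.mem_cons_of_mem _ hd', h⟩, hr, h0⟩
      · rintro ⟨⟨d', hd', h⟩, hr, h0⟩
        rcases List.mem_cons.mp hd' with rfl | hmem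
        · exact absurd (h.1 ▸ h.2 ▸ hr) hb
        · exact ⟨⟨d', hmem, h⟩, hr, h0⟩

lemma spreadF_nv (N : Int) (vir : Int × Int × Int) :
    ∀ (ds : List (Int × Int)) (g : List (List Int)) (acc : List (Int × Int × Int)),
    WFg N g → ds.Nodup → ∀ (w : Int × Int × Int),
    (w ∈ ((ds.foldl (fun st d =>
      let nx := vir.2.1 + d.1
      let ny := vir.2.2 + d.2
      if 0 ≤ nx ∧ nx < N ∧ 0 ≤ ny ∧ ny < N then
        if pvGet st.1 nx ny = 0 then (pvSet st.1 nx ny vir.1, st.2 ++ [(vir.1, nx, ny)])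
        else st
      else st) (g, acc))).2 ↔ w ∈ acc ∨
      ∃ d ∈ ds, regionP N (vir.2.1 + d.1) (vir.2.2 + d.2) ∧
        pvGet g (vir.2.1 + d.1) (vir.2.2 + d.2) = 0 ∧
        w = (vir.1, vir.2.1 + d.1, vir.2.2 + d.2)) := by
  intro ds
  induction ds with
  | nil => intro g acc _ _ w; simp
  | cons d ds ih =>
    intro g acc hW hnd w
    rw [List.foldl_cons]
    dsimp only
    rcases List.nodup_cons.mp hnd with ⟨hd, hnd'⟩
    by_cases hb : 0 ≤ vir.2.1 + d.1 ∧ vir.2.1 + d.1 < N ∧ 0 ≤ vir.2.2 + d.2 ∧ vir.2.2 + d.2 < N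
    · rw [if_pos hb]
      by_cases hc : pvGet g (vir.2.1 + d.1) (vir.2.2 + d.2) = 0
      · rw [if_pos hc]
        rw [ih _ _ (WF_of_shape (sameShape_pvSet ..) hW) hnd' w]
        have hcells : ∀ d' ∈ ds,
            pvGet (pvSet g (vir.2.1 + d.1) (vir.2.2 + d.2) vir.1) (vir.2.1 + d'.1) (vir.2.2 + d'.2)
              = pvGet g (vir.2.1 + d'.1) (vir.2.2 + d'.2) ∨
            ¬ regionP N (vir.2.1 + d'.1) (vir.2.2 + d'.2) := by
          intro d' hd'
          by_cases hr : regionP N (vir.2.1 + d'.1) (vir.2.2 + d'.2)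
          · left
            apply pvGet_pvSet_ne _ (by exact hr.1) (by exact hr.2.2.1) hb.1 hb.2.2.1
            rintro ⟨h1, h2⟩
            exact hd (by
              have hdd : d = d' := Prod.ext (by omega) (by omega)
              rwa [hdd])
          · right; exact hr
        constructor
        · rintro (hmem | ⟨d', hd', hr, h0, hw⟩)
          · rcases List.mem_append.mp hmem with hmem | hmem
            · exact Or.inl hmem
            · right
              refine ⟨d, List.mem_cons_self .., ⟨hb.1, hb.2.1, hb.2.2.1, hb.2.2.2⟩, hc, ?_⟩
              simpa using hmem
          · right
            rcases hcells d' hd' with hcell | hcell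
            · exact ⟨d', List.mem_cons_of_mem _ hd', hr, hcell ▸ h0, hw⟩
            · exact absurd hr hcell
        · rintro (hmem | ⟨d', hd', hr, h0, hw⟩)
          · exact Or.inl (List.mem_append.mpr (Or.inl hmem))
          · rcases List.mem_cons.mp hd' with rfl | hmem
            · exact Or.inl (List.mem_append.mpr (Or.inr (by simp [hw])))
            · rcases hcells d' hmem with hcell | hcell
              · exact Or.inr ⟨d', hmem, hr, hcell.symm ▸ h0, hw⟩
              · exact absurd hr hcell
      · rw [if_neg hc]
        rw [ih _ _ hW hnd' w]
        constructor
        · rintro (hmem | ⟨d', hd', h⟩); exact Or.inl hmem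
          exact Or.inr ⟨d', List.mem_cons_of_mem _ hd', h⟩
        · rintro (hmem | ⟨d', hd', h⟩); exact Or.inl hmem
          rcases List.mem_cons.mp hd' with rfl | hmem2
          · exact absurd h.2.1 hc
          · exact Or.inr ⟨d', hmem2, h⟩
    · rw [if_neg hb]
      rw [ih _ _ hW hnd' w]
      constructor
      · rintro (hmem | ⟨d', hd', h⟩); exact Or.inl hmem
        exact Or.inr ⟨d', List.mem_cons_of_mem _ hd', h⟩
      · rintro (hmem | ⟨d', hd', h⟩); exact Or.inl hmem
        rcases List.mem_cons.mp hd' with rfl | hmem2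
        · exact absurd h.1 hb
        · exact Or.inr ⟨d', hmem2, h⟩

lemma dir_iff_adjB (x y i j : Int) :
    (∃ d ∈ dirsA, i = x + d.1 ∧ j = y + d.2) ↔ adjB x y i j = true := by
  simp only [dirsA, adjB, List.mem_cons, List.not_mem_nil, or_false, exists_eq_or_imp,
    exists_eq_left, Bool.or_eq_true, Bool.and_eq_true, decide_eq_true_eq]
  omega

lemma spreadA_shape (N : Int) (st : List (List Int) × List (Int × Int × Int)) (vir : Int × Int × Int) :
    sameShape st.1 (spreadA N st vir).1 := spreadF_shape N vir dirsA st

lemma spreadA_cell {N : Int} {g : List (List Int)} (acc : List (Int × Int × Int))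
    (vir : Int × Int × Int) (hW : WFg N g) (i j : Int) (hi : 0 ≤ i) (hj : 0 ≤ j) :
    pvGet (spreadA N (g, acc) vir).1 i j =
      if regionP N i j ∧ pvGet g i j = 0 ∧ adjB vir.2.1 vir.2.2 i j = true then vir.1
      else pvGet g i j := by
  unfold spreadA
  rw [spreadF_cell N vir dirsA g acc hW (by decide) i j hi hj]
  have h := dir_iff_adjB vir.2.1 vir.2.2 i j
  congr 1
  simp only [eq_iff_iff]
  rw [h]
  tauto

lemma spreadA_nv_mem {N : Int} {g : List (List Int)} (acc : List (Int × Int × Int))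
    (vir : Int × Int × Int) (hW : WFg N g) (w : Int × Int × Int) :
    w ∈ (spreadA N (g, acc) vir).2 ↔ w ∈ acc ∨
      (regionP N w.2.1 w.2.2 ∧ pvGet g w.2.1 w.2.2 = 0 ∧
        adjB vir.2.1 vir.2.2 w.2.1 w.2.2 = true ∧ w.1 = vir.1) := by
  unfold spreadA
  rw [spreadF_nv N vir dirsA g acc hW (by decide) w]
  constructor
  · rintro (hmem | ⟨d, hd, hr, h0, rfl⟩)
    · exact Or.inl hmem
    · exact Or.inr ⟨hr, h0, (dir_iff_adjB _ _ _ _).mp ⟨d, hd, rfl, rfl⟩, rfl⟩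
  · rintro (hmem | ⟨hr, h0, hadj, hv⟩)
    · exact Or.inl hmem
    · right
      rcases (dir_iff_adjB _ _ _ _).mpr hadj with ⟨d, hd, h1, h2⟩
      refine ⟨d, hd, by rwa [← h1, ← h2], by rwa [← h1, ← h2], ?_⟩
      rcases w with ⟨wv, wx, wy⟩
      simp_all

-- ---- A's whole wave ----

lemma firstAdj_cons (e : Int × Int × Int) (rest : List (Int × Int × Int)) (i j : Int) :
    firstAdj (e :: rest) i j =
      if adjB e.2.1 e.2.2 i j = true then some e.1 else firstAdj rest i j := by
  unfold firstAdj
  by_cases h : adjB e.2.1 e.2.2 i j = true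
  · rw [List.find?_cons_of_pos (by simpa using h), if_pos h]; rfl
  · rw [List.find?_cons_of_neg (by simpa using h), if_neg h]

lemma foldA_shape (N : Int) (level : List (Int × Int × Int)) :
    ∀ (st : List (List Int) × List (Int × Int × Int)),
    sameShape st.1 (level.foldl (spreadA N) st).1 := by
  induction level with
  | nil => exact fun st => sameShape_refl _
  | cons e rest ih =>
    intro st
    rw [List.foldl_cons]
    exact sameShape_trans (spreadA_shape N st e) (ih _)

lemma foldA_cell {N : Int} (level : List (Int × Int × Int)) :
    ∀ {g : List (List Int)} (acc : List (Int × Int × Int)),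
    WFg N g → (∀ e ∈ level, e.1 ≠ 0) → ∀ (i j : Int), 0 ≤ i → 0 ≤ j →
    pvGet (level.foldl (spreadA N) (g, acc)).1 i j =
      if regionP N i j ∧ pvGet g i j = 0 then (firstAdj level i j).getD 0
      else pvGet g i j := by
  induction level with
  | nil =>
    intro g acc _ _ i j _ _
    simp only [List.foldl_nil, firstAdj, List.find?_nil]
    split
    · next h => simpa using h.2
    · rfl
  | cons e rest ih =>
    intro g acc hW hv i j hi hj
    rw [List.foldl_cons]
    rw [show spreadA N (g, acc) e = ((spreadA N (g, acc) e).1, (spreadA N (g, acc) e).2) from rfl]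
    rw [ih _ (WF_of_shape (spreadA_shape N (g, acc) e) hW)
      (fun f hf => hv f (List.mem_cons_of_mem _ hf)) i j hi hj]
    have hcell := spreadA_cell (N := N) acc e hW i j hi hj
    rw [firstAdj_cons]
    by_cases hreg : regionP N i j
    · by_cases h0 : pvGet g i j = 0
      · by_cases hadj : adjB e.2.1 e.2.2 i j = true
        · have hc1 : pvGet (spreadA N (g, acc) e).1 i j = e.1 := by
            rw [hcell, if_pos ⟨hreg, h0, hadj⟩]
          rw [hc1, if_neg (fun hcon => hv e (List.mem_cons_self ..) hcon.2),
            if_pos ⟨hreg, h0⟩, if_pos hadj]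
          rfl
        · have hc1 : pvGet (spreadA N (g, acc) e).1 i j = pvGet g i j := by
            rw [hcell, if_neg (by tauto)]
          rw [hc1, if_neg hadj]
      · have hc1 : pvGet (spreadA N (g, acc) e).1 i j = pvGet g i j := by
          rw [hcell, if_neg (by tauto)]
        rw [hc1, if_neg (by tauto), if_neg (by tauto)]
    · have hc1 : pvGet (spreadA N (g, acc) e).1 i j = pvGet g i j := by
        rw [hcell, if_neg (by tauto)]
      rw [hc1, if_neg (by tauto), if_neg (by tauto)]

lemma foldA_nv_mem {N : Int} (level : List (Int × Int × Int)) :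
    ∀ {g : List (List Int)} (acc : List (Int × Int × Int)),
    WFg N g → (∀ e ∈ level, e.1 ≠ 0) → ∀ (w : Int × Int × Int),
    (w ∈ (level.foldl (spreadA N) (g, acc)).2 ↔ w ∈ acc ∨
      (regionP N w.2.1 w.2.2 ∧ pvGet g w.2.1 w.2.2 = 0 ∧
        firstAdj level w.2.1 w.2.2 = some w.1)) := by
  induction level with
  | nil =>
    intro g acc _ _ w
    simp [firstAdj]
  | cons e rest ih =>
    intro g acc hW hv w
    rw [List.foldl_cons]
    rw [show spreadA N (g, acc) e = ((spreadA N (g, acc) e).1, (spreadA N (g, acc) e).2) from rfl]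
    rw [ih _ (WF_of_shape (spreadA_shape N (g, acc) e) hW)
      (fun f hf => hv f (List.mem_cons_of_mem _ hf)) w]
    rw [spreadA_nv_mem acc e hW w]
    have hcell := spreadA_cell (N := N) acc e hW w.2.1 w.2.2
    rw [firstAdj_cons]
    by_cases hreg : regionP N w.2.1 w.2.2
    · by_cases h0 : pvGet g w.2.1 w.2.2 = 0
      · by_cases hadj : adjB e.2.1 e.2.2 w.2.1 w.2.2 = true
        · have hc1 : pvGet (spreadA N (g, acc) e).1 w.2.1 w.2.2 = e.1 := by
            rw [hcell hreg.1 hreg.2.2.1, if_pos ⟨hreg, h0, hadj⟩]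
          rw [hc1, if_pos hadj]
          have he0 := hv e (List.mem_cons_self ..)
          constructor
          · rintro (h | ⟨_, _, _⟩)
            · rcases h with h | ⟨_, _, _, hv1⟩
              · exact Or.inl h
              · exact Or.inr ⟨hreg, h0, by rw [hv1]⟩
            · exact absurd (by assumption : e.1 = 0) he0
          · rintro (h | ⟨_, _, hs⟩)
            · exact Or.inl (Or.inl h)
            · exact Or.inl (Or.inr ⟨hreg, h0, hadj, (Option.some_inj.mp hs).symm⟩)
        · have hc1 : pvGet (spreadA N (g, acc) e).1 w.2.1 w.2.2 = pvGet g w.2.1 w.2.2 := by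
            rw [hcell hreg.1 hreg.2.2.1, if_neg (by tauto)]
          rw [hc1, if_neg hadj]
          tauto
      · have hc1 : pvGet (spreadA N (g, acc) e).1 w.2.1 w.2.2 = pvGet g w.2.1 w.2.2 := by
          rw [hcell hreg.1 hreg.2.2.1, if_neg (by tauto)]
        rw [hc1]
        by_cases hadj : adjB e.2.1 e.2.2 w.2.1 w.2.2 = true
        · rw [if_pos hadj]; tauto
        · rw [if_neg hadj]; tauto
    · constructor
      · rintro (h | h)
        · rcases h with h | h
          · exact Or.inl h
          · exact absurd h.1 hreg
        · exact absurd h.1 hreg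
      · rintro (h | h)
        · exact Or.inl (Or.inl h)
        · exact absurd h.1 hreg

-- ---- B's wave ----

def pickB (N : Int) (g : List (List Int)) (i j : Int) : Option (Int × Int × Int) :=
  if pvGet g i j ≠ 0 then none
  else (PySem.List.min? (valsB N g i j) (fun v => v)).map (fun m => (i, j, m))

lemma foldl_opt_append {α β : Type} (l : List α) (f : α → Option β) :
    ∀ acc : List β,
    l.foldl (fun acc x => match f x with | none => acc | some b => acc ++ [b]) acc
      = acc ++ l.filterMap f := by
  induction l with
  | nil => intro acc; simp
  | cons x l ih =>
    intro acc
    rw [List.foldl_cons, List.filterMap_cons]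
    cases hfx : f x with
    | none => rw [ih]
    | some b => rw [ih]; simp

lemma waveB_eq_flatMap (N : Int) (g : List (List Int)) :
    waveB N g = (PySem.List.pyRange 0 N 1).flatMap
      (fun i => (PySem.List.pyRange 0 N 1).filterMap (pickB N g i)) := by
  unfold waveB
  have hinner : ∀ (i : Int) (acc : List (Int × Int × Int)),
      (PySem.List.pyRange 0 N 1).foldl (fun acc j =>
        if pvGet g i j ≠ 0 then acc
        else
          match PySem.List.min? (valsB N g i j) (fun v => v) with
          | none => acc
          | some m => acc ++ [(i, j, m)]) acc
      = acc ++ (PySem.List.pyRange 0 N 1).filterMap (pickB N g i) := by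
    intro i acc
    rw [← foldl_opt_append (PySem.List.pyRange 0 N 1) (pickB N g i) acc]
    congr 1
    funext acc j
    unfold pickB
    by_cases h : pvGet g i j ≠ 0
    · rw [if_pos h, if_pos h]
    · rw [if_neg h, if_neg h]
      cases PySem.List.min? (valsB N g i j) (fun v => v) <;> rfl
  calc (PySem.List.pyRange 0 N 1).foldl _ []
      = (PySem.List.pyRange 0 N 1).foldl (fun acc i =>
          acc ++ (PySem.List.pyRange 0 N 1).filterMap (pickB N g i)) [] := by
        apply List.foldl_ext
        intro acc i _
        exact hinner i acc
    _ = _ := by rw [PySem.List.foldl_append_eq_flatMap]; simp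

lemma waveB_mem (N : Int) (g : List (List Int)) (w : Int × Int × Int) :
    w ∈ waveB N g ↔ regionP N w.1 w.2.1 ∧ pvGet g w.1 w.2.1 = 0 ∧
      PySem.List.min? (valsB N g w.1 w.2.1) (fun v => v) = some w.2.2 := by
  rw [waveB_eq_flatMap]
  simp only [List.mem_flatMap, List.mem_filterMap, PySem.List.mem_pyRange_one]
  constructor
  · rintro ⟨i, hi, j, hj, hpick⟩
    unfold pickB at hpick
    split at hpick
    · exact absurd hpick (by simp)
    · next h0 =>
      cases hmin : PySem.List.min? (valsB N g i j) (fun v => v) with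
      | none => rw [hmin] at hpick; exact absurd hpick (by simp)
      | some m =>
        rw [hmin] at hpick
        obtain rfl := (Option.some_inj.mp hpick).symm
        exact ⟨⟨hi.1, hi.2, hj.1, hj.2⟩, by simpa using h0, hmin⟩
  · rintro ⟨hr, h0, hmin⟩
    refine ⟨w.1, ⟨hr.1, hr.2.1⟩, w.2.1, ⟨hr.2.2.1, hr.2.2.2⟩, ?_⟩
    unfold pickB
    rw [if_neg (by simpa using h0), hmin]
    rfl

lemma commitB_shape (g : List (List Int)) (U : List (Int × Int × Int)) :
    sameShape g (commitB g U) := by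
  induction U generalizing g with
  | nil => exact sameShape_refl g
  | cons u rest ih =>
    exact sameShape_trans (sameShape_pvSet g u.1 u.2.1 u.2.2) (ih _)

lemma commitB_cell {N : Int} (U : List (Int × Int × Int)) :
    ∀ {g : List (List Int)} (F : Int → Int → Int), WFg N g →
    (∀ u ∈ U, regionP N u.1 u.2.1) → (∀ u ∈ U, u.2.2 = F u.1 u.2.1) →
    ∀ (i j : Int), 0 ≤ i → 0 ≤ j →
    pvGet (commitB g U) i j =
      if ∃ u ∈ U, u.1 = i ∧ u.2.1 = j then F i j else pvGet g i j := by
  induction U with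
  | nil => intro g F _ _ _ i j _ _; simp [commitB]
  | cons u rest ih =>
    intro g F hW hreg hfn i j hi hj
    have hstep : commitB g (u :: rest) = commitB (pvSet g u.1 u.2.1 u.2.2) rest := rfl
    rw [hstep, ih F (WF_of_shape (sameShape_pvSet ..) hW)
      (fun v hv => hreg v (List.mem_cons_of_mem _ hv))
      (fun v hv => hfn v (List.mem_cons_of_mem _ hv)) i j hi hj]
    have hru := hreg u (List.mem_cons_self ..)
    by_cases hij : u.1 = i ∧ u.2.1 = j
    · have hset : pvGet (pvSet g u.1 u.2.1 u.2.2) i j = F i j := by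
        rw [← hij.1, ← hij.2]
        rw [pvGet_pvSet_same _ hW hru.1 hru.2.1 hru.2.2.1 hru.2.2.2]
        exact hfn u (List.mem_cons_self ..)
      rw [if_pos (show ∃ v ∈ u :: rest, v.1 = i ∧ v.2.1 = j from ⟨u, List.mem_cons_self .., hij⟩)]
      split
      · rfl
      · exact hset
    · have hset : pvGet (pvSet g u.1 u.2.1 u.2.2) i j = pvGet g i j :=
        pvGet_pvSet_ne _ hi hj hru.1 hru.2.2.1 (by tauto)
      rw [hset]
      congr 1
      simp only [eq_iff_iff]
      constructor
      · rintro ⟨v, hv, h⟩; exact ⟨v, List.mem_cons_of_mem _ hv, h⟩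
      · rintro ⟨v, hv, h⟩
        rcases List.mem_cons.mp hv with rfl | hv2
        · exact absurd h hij
        · exact ⟨v, hv2, h⟩

lemma valsB_mem (N : Int) (g : List (List Int)) (i j w : Int) :
    w ∈ valsB N g i j ↔ ∃ x y, regionP N x y ∧ adjB x y i j = true ∧
      pvGet g x y ≠ 0 ∧ w = pvGet g x y := by
  unfold valsB
  simp only [List.mem_filterMap, List.mem_cons, List.not_mem_nil, or_false]
  constructor
  · rintro ⟨c, hc, hf⟩
    split at hf
    · next hcond =>
      obtain rfl := Option.some_inj.mp hf
      refine ⟨c.1, c.2, ⟨hcond.1, hcond.2.1, hcond.2.2.1, hcond.2.2.2.1⟩, ?_,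
        hcond.2.2.2.2, rfl⟩
      rcases hc with rfl | rfl | rfl | rfl <;> simp [adjB]
    · exact absurd hf (by simp)
  · rintro ⟨x, y, hr, hadj, h0, rfl⟩
    have hxy : (x, y) = (i + 1, j) ∨ (x, y) = (i - 1, j) ∨
        (x, y) = (i, j + 1) ∨ (x, y) = (i, j - 1) := by
      simp only [adjB, Bool.or_eq_true, Bool.and_eq_true, decide_eq_true_eq] at hadj
      simp only [Prod.mk.injEq]
      omega
    refine ⟨(x, y), hxy, ?_⟩
    rw [if_pos ⟨hr.1, hr.2.1, hr.2.2.1, hr.2.2.2, h0⟩]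

-- ---- find?/pairwise/sorted bridges ----

lemma find?_pairwise {α : Type} {R : α → α → Prop} {l : List α} {p : α → Bool} {e : α}
    (h : l.Pairwise R) (hf : l.find? p = some e) :
    ∀ f ∈ l, p f = true → e = f ∨ R e f := by
  induction l with
  | nil => simp at hf
  | cons a l ih =>
    rcases List.pairwise_cons.mp h with ⟨hhead, htail⟩
    by_cases hpa : p a = true
    · rw [List.find?_cons_of_pos hpa] at hf
      obtain rfl := Option.some_inj.mp hf
      intro f hfmem _
      rcases List.mem_cons.mp hfmem with rfl | hfl
      · exact Or.inl rfl
      · exact Or.inr (hhead f hfl)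
    · rw [List.find?_cons_of_neg hpa] at hf
      intro f hfmem hpf
      rcases List.mem_cons.mp hfmem with rfl | hfl
      · exact absurd hpf hpa
      · exact ih htail hf f hfl hpf

lemma pairwise_fst_sorted (l : List (Int × Int × Int)) :
    (PySem.List.sorted l keyA).Pairwise (fun a b => a.1 ≤ b.1) := by
  have h := PySem.List.sorted_pairwise (xs := l) (key := keyA)
  refine h.imp ?_
  intro a b hab
  unfold keyA at hab
  rcases Prod.Lex.le_iff.mp hab with h1 | ⟨h1, _⟩
  · exact le_of_lt h1
  · exact le_of_eq h1

-- level entries adjacent to (i, j) are exactly the nonzero neighbour values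
lemma firstAdj_none_iff {N : Int} {level : List (Int × Int × Int)} {g : List (List Int)}
    (hInv : InvA N level g) {i j : Int} (hreg : regionP N i j) (h0 : pvGet g i j = 0) :
    firstAdj level i j = none ↔ valsB N g i j = [] := by
  constructor
  · intro hnone
    rw [List.eq_nil_iff_forall_not_mem]
    intro w hw
    rcases (valsB_mem N g i j w).mp hw with ⟨x, y, hr, hadj, hnz, rfl⟩
    have hmem := hInv.2.2 i j x y hreg h0 hr hadj hnz
    have := List.find?_eq_none.mp (by
      unfold firstAdj at hnone
      exact Option.map_eq_none_iff.mp hnone) _ hmem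
    exact absurd hadj (by simpa using this)
  · intro hnil
    unfold firstAdj
    rw [Option.map_eq_none_iff, List.find?_eq_none]
    intro e he hpe
    have h1 := hInv.1 e he
    have : e.1 ∈ valsB N g i j := (valsB_mem N g i j e.1).mpr
      ⟨e.2.1, e.2.2, h1.1, by simpa using hpe, h1.2.1 ▸ h1.2.2, h1.2.1.symm⟩
    rw [hnil] at this
    exact absurd this (List.not_mem_nil)

lemma firstAdj_eq_min {N : Int} {level : List (Int × Int × Int)} {g : List (List Int)}
    (hInv : InvA N level g) {i j v m : Int} (hreg : regionP N i j) (h0 : pvGet g i j = 0)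
    (hfa : firstAdj level i j = some v)
    (hmin : PySem.List.min? (valsB N g i j) (fun x => x) = some m) : v = m := by
  unfold firstAdj at hfa
  rcases Option.map_eq_some_iff.mp hfa with ⟨e0, hfind, hv0⟩
  have he0mem := List.mem_of_find?_eq_some hfind
  have hpe0 : adjB e0.2.1 e0.2.2 i j = true := by
    have := List.find?_some hfind
    simpa using this
  have h1 := hInv.1 e0 he0mem
  -- m ≤ v : e0's value is one of the candidate values
  have he0val : e0.1 ∈ valsB N g i j := (valsB_mem N g i j e0.1).mpr
    ⟨e0.2.1, e0.2.2, h1.1, hpe0, h1.2.1 ▸ h1.2.2, h1.2.1.symm⟩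
  have hmv : m ≤ e0.1 := PySem.List.min?_isMin hmin e0.1 he0val
  -- v ≤ m : the minimum value is the value of some adjacent level entry
  have hmmem : m ∈ valsB N g i j := PySem.List.min?_mem hmin
  rcases (valsB_mem N g i j m).mp hmmem with ⟨x, y, hr, hadj, hnz, hmval⟩
  have hlev := hInv.2.2 i j x y hreg h0 hr hadj hnz
  have := find?_pairwise hInv.2.1 hfind _ hlev (by simpa using hadj)
  rcases this with heq | hle
  · rw [heq] at hv0
    dsimp only at hv0
    omega
  · dsimp only at hle
    omega

-- ---- the wave correspondence ----

lemma sameShape_symm {g h : List (List Int)} (hs : sameShape g h) : sameShape h g :=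
  ⟨hs.1.symm, fun r => (hs.2 r).symm⟩

lemma wave_grid {N : Int} {level : List (Int × Int × Int)} {g : List (List Int)}
    (hW : WFg N g) (hInv : InvA N level g) :
    (level.foldl (spreadA N) (g, [])).1 = commitB g (waveB N g) := by
  have hv : ∀ e ∈ level, e.1 ≠ 0 := fun e he => (hInv.1 e he).2.2
  apply grid_eq_of_cells
  · exact sameShape_trans (sameShape_symm (foldA_shape N level (g, []))) (commitB_shape g _)
  · intro i j hi hj
    rw [foldA_cell level [] hW hv i j hi hj]
    rw [commitB_cell (waveB N g) (fun i j => (PySem.List.min? (valsB N g i j) (fun v => v)).getD 0)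
      hW (fun u hu => ((waveB_mem N g u).mp hu).1)
      (fun u hu => by dsimp only; rw [((waveB_mem N g u).mp hu).2.2]; rfl) i j hi hj]
    by_cases hcond : regionP N i j ∧ pvGet g i j = 0
    · rw [if_pos hcond]
      cases hmin : PySem.List.min? (valsB N g i j) (fun v => v) with
      | none =>
        have hvals := (PySem.List.min?_eq_none_iff _ _).mp hmin
        have hfa : firstAdj level i j = none :=
          (firstAdj_none_iff hInv hcond.1 hcond.2).mpr hvals
        rw [hfa, if_neg ?_]
        · exact hcond.2.symm
        · rintro ⟨u, hu, h1, h2⟩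
          have := ((waveB_mem N g u).mp hu).2.2
          rw [h1, h2, hmin] at this
          exact absurd this (by simp)
      | some m =>
        rw [if_pos ⟨(i, j, m), (waveB_mem N g (i, j, m)).mpr ⟨hcond.1, hcond.2, hmin⟩, rfl, rfl⟩]
        cases hfa : firstAdj level i j with
        | none =>
          have hvals := (firstAdj_none_iff hInv hcond.1 hcond.2).mp hfa
          rw [hvals, (PySem.List.min?_eq_none_iff ([] : List Int) (fun v => v)).mpr rfl] at hmin
          cases hmin
        | some v =>
          have := firstAdj_eq_min hInv hcond.1 hcond.2 hfa hmin
          simp [this]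
    · rw [if_neg hcond, if_neg ?_]
      rintro ⟨u, hu, h1, h2⟩
      have h3 := (waveB_mem N g u).mp hu
      exact hcond ⟨h1 ▸ h2 ▸ h3.1, h1 ▸ h2 ▸ h3.2.1⟩

lemma wave_empty {N : Int} {level : List (Int × Int × Int)} {g : List (List Int)}
    (hW : WFg N g) (hInv : InvA N level g) :
    ((level.foldl (spreadA N) (g, [])).2 = [] ↔ waveB N g = []) := by
  have hv : ∀ e ∈ level, e.1 ≠ 0 := fun e he => (hInv.1 e he).2.2
  rw [List.eq_nil_iff_forall_not_mem, List.eq_nil_iff_forall_not_mem]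
  constructor
  · intro h w hw
    rcases (waveB_mem N g w).mp hw with ⟨hr, h0, hmin⟩
    cases hfa : firstAdj level w.1 w.2.1 with
    | none =>
      have hvals := (firstAdj_none_iff hInv hr h0).mp hfa
      rw [hvals, (PySem.List.min?_eq_none_iff ([] : List Int) (fun v => v)).mpr rfl] at hmin
      cases hmin
    | some v =>
      exact h (v, w.1, w.2.1) ((foldA_nv_mem level [] hW hv (v, w.1, w.2.1)).mpr
        (Or.inr ⟨hr, h0, hfa⟩))
  · intro h w hw
    rcases (foldA_nv_mem level [] hW hv w).mp hw with hmem | ⟨hr, h0, hfa⟩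
    · exact absurd hmem (List.not_mem_nil)
    · have hvne : valsB N g w.2.1 w.2.2 ≠ [] := by
        intro hnil
        rw [(firstAdj_none_iff hInv hr h0).mpr hnil] at hfa
        exact absurd hfa (by simp)
      cases hmin : PySem.List.min? (valsB N g w.2.1 w.2.2) (fun v => v) with
      | none => exact absurd ((PySem.List.min?_eq_none_iff _ _).mp hmin) hvne
      | some m =>
        exact h (w.2.1, w.2.2, m) ((waveB_mem N g (w.2.1, w.2.2, m)).mpr ⟨hr, h0, hmin⟩)

lemma wave_inv {N : Int} {level : List (Int × Int × Int)} {g : List (List Int)}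
    (hW : WFg N g) (hInv : InvA N level g) :
    InvA N (PySem.List.sorted (level.foldl (spreadA N) (g, [])).2 keyA)
      (level.foldl (spreadA N) (g, [])).1 := by
  have hv : ∀ e ∈ level, e.1 ≠ 0 := fun e he => (hInv.1 e he).2.2
  have hfa_val : ∀ {i j v : Int}, firstAdj level i j = some v → v ≠ 0 := by
    intro i j v hfa
    unfold firstAdj at hfa
    rcases Option.map_eq_some_iff.mp hfa with ⟨e0, hfind, hv0⟩
    exact hv0 ▸ hv e0 (List.mem_of_find?_eq_some hfind)
  refine ⟨?_, pairwise_fst_sorted _, ?_⟩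
  · intro e he
    rw [PySem.List.mem_sorted] at he
    rcases (foldA_nv_mem level [] hW hv e).mp he with hmem | ⟨hr, h0, hfa⟩
    · exact absurd hmem (List.not_mem_nil)
    · refine ⟨hr, ?_, hfa_val hfa⟩
      rw [foldA_cell level [] hW hv e.2.1 e.2.2 hr.1 hr.2.2.1, if_pos ⟨hr, h0⟩, hfa]
      rfl
  · intro i j x y hreg h0' hr hadj hnz'
    have hci := foldA_cell level [] hW hv i j hreg.1 hreg.2.2.1
    have hcx := foldA_cell level [] hW hv x y hr.1 hr.2.2.1
    -- the centre cell is still empty: it was empty before and nothing adjacent claimed it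
    have h0 : pvGet g i j = 0 := by
      by_contra hne
      rw [hci, if_neg (by tauto)] at h0'
      exact hne h0'
    have hfa_i : firstAdj level i j = none := by
      cases hfa : firstAdj level i j with
      | none => rfl
      | some v =>
        rw [hci, if_pos ⟨hreg, h0⟩, hfa] at h0'
        exact absurd (hfa_val hfa) (by simpa using h0')
    -- the neighbour cannot have been nonzero already (it would be a level entry adjacent to (i,j))
    have hx0 : pvGet g x y = 0 := by
      by_contra hne
      have hmem := hInv.2.2 i j x y hreg h0 hr hadj hne
      apply absurd hfa_i
      unfold firstAdj
      intro hmapnone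
      have hfind := Option.map_eq_none_iff.mp hmapnone
      exact absurd hadj (by simpa using List.find?_eq_none.mp hfind _ hmem)
    -- so it was claimed in this wave
    rw [hcx, if_pos ⟨hr, hx0⟩] at hnz' ⊢
    cases hfa : firstAdj level x y with
    | none => rw [hfa] at hnz'; exact absurd rfl hnz'
    | some v =>
      rw [PySem.List.mem_sorted]
      exact (foldA_nv_mem level [] hW hv ((some v).getD 0, x, y)).mpr
        (Or.inr ⟨hr, hx0, by simpa using hfa⟩)

-- ---- the synchronized loops ----

lemma loopA_succ (N X Y : Int) (fuel : Nat) (second : Int) (level : List (Int × Int × Int))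
    (g : List (List Int)) :
    loopA N X Y (fuel + 1) second level g =
      if second = 0 then pvFinal g X Y
      else if (level.foldl (spreadA N) (g, [])).2 = [] then
        pvFinal (level.foldl (spreadA N) (g, [])).1 X Y
      else loopA N X Y fuel (second - 1)
        (PySem.List.sorted (level.foldl (spreadA N) (g, [])).2 keyA)
        (level.foldl (spreadA N) (g, [])).1 := rfl

lemma loopB_succ (N X Y : Int) (fuel : Nat) (t second : Int) (g : List (List Int)) :
    loopB N X Y (fuel + 1) t second g =
      if t = second then pvFinal g X Y
      else if waveB N g = [] then pvFinal g X Y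
      else loopB N X Y fuel (t + 1) second (commitB g (waveB N g)) := rfl

lemma loop_corr {N X Y : Int} : ∀ (fuel : Nat) (t second : Int)
    (level : List (Int × Int × Int)) (g : List (List Int)),
    WFg N g → InvA N level g →
    loopA N X Y fuel (second - t) level g = loopB N X Y fuel t second g := by
  intro fuel
  induction fuel with
  | zero => intro t second level g _ _; rfl
  | succ fuel ih =>
    intro t second level g hW hInv
    rw [loopA_succ, loopB_succ]
    by_cases hstop : second - t = 0
    · rw [if_pos hstop, if_pos (show t = second by omega)]
    · rw [if_neg hstop, if_neg (show ¬ t = second by omega)]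
      have hgrid := wave_grid hW hInv
      have hempty := wave_empty hW hInv
      by_cases hnil : (level.foldl (spreadA N) (g, [])).2 = []
      · rw [if_pos hnil, if_pos (hempty.mp hnil)]
        rw [hgrid, hempty.mp hnil]
        rfl
      · rw [if_neg hnil, if_neg (fun h => hnil (hempty.mpr h))]
        have hW' : WFg N (level.foldl (spreadA N) (g, [])).1 :=
          WF_of_shape (foldA_shape N level (g, [])) hW
        have hInv' := wave_inv hW hInv
        have := ih (t + 1) second
          (PySem.List.sorted (level.foldl (spreadA N) (g, [])).2 keyA)
          (level.foldl (spreadA N) (g, [])).1 hW' hInv'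
        rw [show second - t - 1 = second - (t + 1) by ring]
        rw [this, hgrid]

-- ---- the initial level ----

lemma start_eq_flatMap (N : Int) (tt : List (List Int)) :
    (PySem.List.pyRange 0 N 1).foldl (fun acc i =>
      (PySem.List.pyRange 0 N 1).foldl (fun acc j =>
        if pvGet tt i j ≠ 0 then acc ++ [(pvGet tt i j, i, j)] else acc) acc) []
    = (PySem.List.pyRange 0 N 1).flatMap (fun i => (PySem.List.pyRange 0 N 1).filterMap
        (fun j => if pvGet tt i j ≠ 0 then some (pvGet tt i j, i, j) else none)) := by
  have hinner : ∀ (i : Int) (acc : List (Int × Int × Int)),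
      (PySem.List.pyRange 0 N 1).foldl (fun acc j =>
        if pvGet tt i j ≠ 0 then acc ++ [(pvGet tt i j, i, j)] else acc) acc
      = acc ++ (PySem.List.pyRange 0 N 1).filterMap
          (fun j => if pvGet tt i j ≠ 0 then some (pvGet tt i j, i, j) else none) := by
    intro i acc
    rw [← foldl_opt_append (PySem.List.pyRange 0 N 1)
      (fun j => if pvGet tt i j ≠ 0 then some (pvGet tt i j, i, j) else none) acc]
    congr 1
    funext acc j
    by_cases h : pvGet tt i j ≠ 0
    · rw [if_pos h]; simp only [if_pos h]
    · rw [if_neg h]; simp only [if_neg h]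
  calc (PySem.List.pyRange 0 N 1).foldl _ []
      = (PySem.List.pyRange 0 N 1).foldl (fun acc i =>
          acc ++ (PySem.List.pyRange 0 N 1).filterMap
            (fun j => if pvGet tt i j ≠ 0 then some (pvGet tt i j, i, j) else none)) [] := by
        apply List.foldl_ext
        intro acc i _
        exact hinner i acc
    _ = _ := by rw [PySem.List.foldl_append_eq_flatMap]; simp

lemma start_mem (N : Int) (tt : List (List Int)) (w : Int × Int × Int) :
    w ∈ (PySem.List.pyRange 0 N 1).foldl (fun acc i =>
      (PySem.List.pyRange 0 N 1).foldl (fun acc j =>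
        if pvGet tt i j ≠ 0 then acc ++ [(pvGet tt i j, i, j)] else acc) acc) [] ↔
      regionP N w.2.1 w.2.2 ∧ pvGet tt w.2.1 w.2.2 = w.1 ∧ w.1 ≠ 0 := by
  rw [start_eq_flatMap]
  simp only [List.mem_flatMap, List.mem_filterMap, PySem.List.mem_pyRange_one]
  constructor
  · rintro ⟨i, hi, j, hj, hpick⟩
    split at hpick
    · next h =>
      obtain rfl := (Option.some_inj.mp hpick).symm
      exact ⟨⟨hi.1, hi.2, hj.1, hj.2⟩, rfl, h⟩
    · exact absurd hpick (by simp)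
  · rintro ⟨hr, hval, hnz⟩
    refine ⟨w.2.1, ⟨hr.1, hr.2.1⟩, w.2.2, ⟨hr.2.2.1, hr.2.2.2⟩, ?_⟩
    rw [if_pos (hval.symm ▸ hnz)]
    rw [hval]

lemma WF_of_pre {N : Int} {tt : List (List Int)} {ri : List Int}
    (h : Pre_solution N tt ri) : WFg N tt := by
  intro r hr
  have hN : 0 < N := by omega
  obtain ⟨hlen, hrows⟩ := h.2.1 hN
  have hrlen : r < tt.length := by omega
  refine ⟨hrlen, ?_⟩
  have hmem : tt.getD r [] ∈ tt.take N.toNat := by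
    have h1 : r < (tt.take N.toNat).length := by
      simp only [List.length_take]
      omega
    have h2 : (tt.take N.toNat)[r] = tt[r] := List.getElem_take
    rw [List.getD_eq_getElem _ _ hrlen, ← h2]
    exact List.getElem_mem h1
  exact hrows _ hmem

lemma start_inv {N : Int} {tt : List (List Int)} :
    InvA N (PySem.List.sorted ((PySem.List.pyRange 0 N 1).foldl (fun acc i =>
      (PySem.List.pyRange 0 N 1).foldl (fun acc j =>
        if pvGet tt i j ≠ 0 then acc ++ [(pvGet tt i j, i, j)] else acc) acc) []) keyA) tt := by
  refine ⟨?_, pairwise_fst_sorted _, ?_⟩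
  · intro e he
    rw [PySem.List.mem_sorted] at he
    exact (start_mem N tt e).mp he
  · intro i j x y _ _ hr _ hnz
    rw [PySem.List.mem_sorted]
    exact (start_mem N tt (pvGet tt x y, x, y)).mpr ⟨hr, rfl, hnz⟩

-- ===== VERDICT (by name: the statement is the Claim_ definition above) =====
theorem solution_spec : Claim_equal_solution := by
  intro N tt ri _hDom hPre
  unfold Spec_solution solution solution_alt
  have hW : WFg N tt := WF_of_pre hPre
  have := loop_corr (N := N) (X := ri.getD 1 0) (Y := ri.getD 2 0)
    (N.toNat * N.toNat + 1) 0 (ri.getD 0 0) _ tt hW start_inv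
  simpa using this
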